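-- pv_equiv track=rewrite | github.com/coopsor/SVDF | SVIntra.py | analyze_cigar_indel
-- ===== SOURCE A (Python) =====
-- def analyze_cigar_indel(tuples, min_length):
--     """Parses CIGAR tuples (op, len) and returns Indels with a length > minLength"""
--     pos_ref = 0
--     pos_read = 0
--     indels = []
--     soft_clipped_length = 0
--     for operation, length in tuples:
--         if operation == 0:  # alignment match
--             pos_ref += length
--             pos_read += length
--         elif operation == 1:  # insertion
--             if length >= min_length:
--                 indels.append((pos_ref, pos_read, length, "INS", operation))
--             pos_read += length
--         elif operation == 2:  # deletion
--             if length >= min_length: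
--                 indels.append((pos_ref, pos_read, length, "DEL", operation))
--             pos_ref += length
--         elif operation == 4:  # soft clip
--             pos_read += length
--             soft_clipped_length += length
--         elif operation == 7 or operation == 8:  # match or mismatch
--             pos_ref += length
--             pos_read += length
--     return indels, [soft_clipped_length, len(indels)]
-- ===== SOURCE B (Python) =====
-- def _delta(op, ln):
--     """(ref_delta, read_delta) consumed by one CIGAR op."""
--     if op in (0, 7, 8):
--         return (ln, ln)
--     if op in (1, 4):
--         return (0, ln)
--     if op == 2:
--         return (ln, 0)
--     return (0, 0)
--
--
-- def analyze_cigar_indel(tuples, min_length):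
--     # pass 1: exclusive-prefix positions (pos before each op)
--     positions = []
--     r = w = 0
--     for op, ln in tuples:
--         positions.append((r, w))
--         dr, dw = _delta(op, ln)
--         r += dr
--         w += dw
--     # pass 2: select long indels at their precomputed positions
--     indels = [
--         (pr, pw, ln, "INS" if op == 1 else "DEL", op)
--         for (pr, pw), (op, ln) in zip(positions, tuples)
--         if op in (1, 2) and ln >= min_length
--     ]
--     soft = sum(ln for op, ln in tuples if op == 4)
--     return indels, [soft, len(indels)]
-- ===== Notes on version B (the rewrite author's own statement) =====
-- stated objective: alternative
-- what changed: Replaces A's single interleaved loop (mutating positions, indel list and soft-clip counter together) by a two-pass decomposition: an exclusive prefix-position table built from per-op (ref,read) deltas, then a zip/filter comprehension selecting the long indels, with the soft-clipped length computed as a separate sum.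
import Mathlib
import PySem

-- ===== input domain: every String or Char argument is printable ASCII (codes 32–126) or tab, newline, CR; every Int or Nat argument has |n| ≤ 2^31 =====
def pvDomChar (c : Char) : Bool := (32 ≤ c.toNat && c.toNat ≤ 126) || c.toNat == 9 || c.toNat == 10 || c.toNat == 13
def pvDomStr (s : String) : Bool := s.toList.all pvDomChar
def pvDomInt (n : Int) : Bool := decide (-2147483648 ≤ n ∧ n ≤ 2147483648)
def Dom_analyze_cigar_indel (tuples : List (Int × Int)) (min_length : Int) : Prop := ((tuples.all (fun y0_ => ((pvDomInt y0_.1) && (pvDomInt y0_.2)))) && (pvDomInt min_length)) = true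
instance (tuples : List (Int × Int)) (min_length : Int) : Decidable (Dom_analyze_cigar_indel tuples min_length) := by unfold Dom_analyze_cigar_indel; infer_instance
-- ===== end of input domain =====

-- B replaces A's single interleaved loop by a two-pass decomposition (prefix-position
-- table, then a zip/filter selection, with the soft-clip total as a separate sum); same cost.

-- ===== PORT A =====
-- one iteration of A's for-loop over the state (pos_ref, pos_read, indels, soft_clipped_length)
def aStep (min_length : Int)
    (st : Int × Int × List (Int × Int × Int × String × Int) × Int) (t : Int × Int) :
    Int × Int × List (Int × Int × Int × String × Int) × Int :=
  let (pos_ref, pos_read, indels, soft) := st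
  let (operation, length) := t
  if operation = 0 then
    (pos_ref + length, pos_read + length, indels, soft)
  else if operation = 1 then
    (pos_ref, pos_read + length,
      (if length ≥ min_length then indels ++ [(pos_ref, pos_read, length, "INS", operation)] else indels),
      soft)
  else if operation = 2 then
    (pos_ref + length, pos_read,
      (if length ≥ min_length then indels ++ [(pos_ref, pos_read, length, "DEL", operation)] else indels),
      soft)
  else if operation = 4 then
    (pos_ref, pos_read + length, indels, soft + length)
  else if operation = 7 ∨ operation = 8 then
    (pos_ref + length, pos_read + length, indels, soft)
  else
    (pos_ref, pos_read, indels, soft)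

def analyze_cigar_indel (tuples : List (Int × Int)) (min_length : Int) :
    (List (Int × Int × Int × String × Int)) × List Int :=
  let st := tuples.foldl (aStep min_length) (0, 0, [], 0)
  (st.2.2.1, [st.2.2.2, (st.2.2.1.length : Int)])

-- ===== PORT B =====
-- per-op (ref_delta, read_delta)
def bDelta (t : Int × Int) : Int × Int :=
  let (op, ln) := t
  if op = 0 ∨ op = 7 ∨ op = 8 then (ln, ln)
  else if op = 1 ∨ op = 4 then (0, ln)
  else if op = 2 then (ln, 0)
  else (0, 0)

-- pass 1 of Source B: exclusive prefix positions before each tuple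
def bPositions (r w : Int) : List (Int × Int) → List (Int × Int)
  | [] => []
  | t :: rest =>
    let d := bDelta t
    (r, w) :: bPositions (r + d.1) (w + d.2) rest

-- the comprehension's per-element selection
def bPick (min_length : Int) (p : (Int × Int) × (Int × Int)) :
    Option (Int × Int × Int × String × Int) :=
  let ((pr, pw), (op, ln)) := p
  if (op = 1 ∨ op = 2) ∧ ln ≥ min_length then
    some (pr, pw, ln, (if op = 1 then "INS" else "DEL"), op)
  else none

def analyze_cigar_indel_alt (tuples : List (Int × Int)) (min_length : Int) :
    (List (Int × Int × Int × String × Int)) × List Int :=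
  let indels := ((bPositions 0 0 tuples).zip tuples).filterMap (bPick min_length)
  let soft := (tuples.filterMap (fun t => if t.1 = 4 then some t.2 else none)).sum
  (indels, [soft, (indels.length : Int)])

-- ===== PRECONDITION & SPEC =====
def Spec_analyze_cigar_indel (tuples : List (Int × Int)) (min_length : Int) (out : (List (Int × Int × Int × String × Int)) × List Int) : Prop := out = analyze_cigar_indel_alt tuples min_length
instance (tuples : List (Int × Int)) (min_length : Int) (out : (List (Int × Int × Int × String × Int)) × List Int) : Decidable (Spec_analyze_cigar_indel tuples min_length out) := by unfold Spec_analyze_cigar_indel; infer_instance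

-- ===== CLAIM (what is proved, stated in full; the proofs are below) =====
def Claim_equal_analyze_cigar_indel : Prop := ∀ (tuples : List (Int × Int)) (min_length : Int), Dom_analyze_cigar_indel tuples min_length → Spec_analyze_cigar_indel tuples min_length (analyze_cigar_indel tuples min_length)

-- ===== LEMMAS AND PROOFS =====

set_option maxRecDepth 4000

-- B's selected indels starting from an arbitrary position
def bIndelsFrom (m r w : Int) (ts : List (Int × Int)) : List (Int × Int × Int × String × Int) :=
  ((bPositions r w ts).zip ts).filterMap (bPick m)

def bSoft (ts : List (Int × Int)) : Int :=
  (ts.filterMap (fun t => if t.1 = 4 then some t.2 else none)).sum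

lemma bIndelsFrom_cons (m r w : Int) (t : Int × Int) (rest : List (Int × Int)) :
    bIndelsFrom m r w (t :: rest) =
      (bPick m ((r, w), t)).toList ++
        bIndelsFrom m (r + (bDelta t).1) (w + (bDelta t).2) rest := by
  cases h : bPick m ((r, w), t) <;>
    simp [bIndelsFrom, bPositions, h]

lemma bSoft_cons (t : Int × Int) (rest : List (Int × Int)) :
    bSoft (t :: rest) = (if t.1 = 4 then t.2 else 0) + bSoft rest := by
  by_cases h : t.1 = 4 <;> simp [bSoft, h]

lemma foldA_eq (m : Int) (ts : List (Int × Int)) :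
    ∀ (r w : Int) (acc : List (Int × Int × Int × String × Int)) (s : Int),
      ts.foldl (aStep m) (r, w, acc, s) =
        ((ts.foldl (aStep m) (r, w, acc, s)).1,
         (ts.foldl (aStep m) (r, w, acc, s)).2.1,
         acc ++ bIndelsFrom m r w ts,
         s + bSoft ts) := by
  induction ts with
  | nil => intro r w acc s; simp [bIndelsFrom, bPositions, bSoft]
  | cons t rest ih =>
    intro r w acc s
    obtain ⟨op, ln⟩ := t
    simp only [List.foldl_cons, bIndelsFrom_cons, bSoft_cons]
    by_cases h0 : op = 0
    · subst h0
      rw [show aStep m (r, w, acc, s) (0, ln) = (r + ln, w + ln, acc, s) by simp [aStep]]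
      rw [ih]
      simp [bDelta, bPick]
    · by_cases h1 : op = 1
      · subst h1
        by_cases hm : ln ≥ m
        · rw [show aStep m (r, w, acc, s) (1, ln)
                = (r, w + ln, acc ++ [(r, w, ln, "INS", 1)], s) by simp [aStep, hm]]
          rw [ih]
          simp [bDelta, bPick, hm]
        · rw [show aStep m (r, w, acc, s) (1, ln) = (r, w + ln, acc, s) by simp [aStep, hm]]
          rw [ih]
          simp [bDelta, bPick, hm]
      · by_cases h2 : op = 2
        · subst h2
          by_cases hm : ln ≥ m
          · rw [show aStep m (r, w, acc, s) (2, ln)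
                  = (r + ln, w, acc ++ [(r, w, ln, "DEL", 2)], s) by simp [aStep, hm]]
            rw [ih]
            simp [bDelta, bPick, hm]
          · rw [show aStep m (r, w, acc, s) (2, ln) = (r + ln, w, acc, s) by simp [aStep, hm]]
            rw [ih]
            simp [bDelta, bPick, hm]
        · by_cases h4 : op = 4
          · subst h4
            rw [show aStep m (r, w, acc, s) (4, ln) = (r, w + ln, acc, s + ln) by simp [aStep]]
            rw [ih]
            simp [bDelta, bPick, add_assoc]
          · by_cases h78 : op = 7 ∨ op = 8
            · rw [show aStep m (r, w, acc, s) (op, ln) = (r + ln, w + ln, acc, s)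
                    by simp [aStep, h0, h1, h2, h4, h78]]
              rw [ih]
              have hd : op = 0 ∨ op = 7 ∨ op = 8 := Or.inr h78
              simp [bDelta, bPick, h1, h2, h4, hd]
            · have h7 : ¬ op = 7 := fun h => h78 (Or.inl h)
              have h8 : ¬ op = 8 := fun h => h78 (Or.inr h)
              rw [show aStep m (r, w, acc, s) (op, ln) = (r, w, acc, s)
                    by simp [aStep, h0, h1, h2, h4, h7, h8]]
              rw [ih]
              simp [bDelta, bPick, h0, h1, h2, h4, h7, h8]

-- ===== VERDICT (by name: the statement is the Claim_ definition above) =====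
theorem analyze_cigar_indel_spec : Claim_equal_analyze_cigar_indel := by
  intro tuples min_length _
  unfold Spec_analyze_cigar_indel
  have h := foldA_eq min_length tuples 0 0 [] 0
  have e1 : (tuples.foldl (aStep min_length) (0, 0, [], 0)).2.2.1
      = bIndelsFrom min_length 0 0 tuples := by rw [h]; simp
  have e2 : (tuples.foldl (aStep min_length) (0, 0, [], 0)).2.2.2 = bSoft tuples := by
    rw [h]; simp
  simp only [analyze_cigar_indel, analyze_cigar_indel_alt, e1, e2, bIndelsFrom, bSoft]
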